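-- pv_equiv track=rewrite | github.com/jaan0/lets_say_random_name_heheheheh | api/analyzer.py | _get_content_recommendations
-- ===== SOURCE A (Python) =====
-- from typing import Dict, List, Any
--
-- def _get_content_recommendations(issues: List[str]) -> List[str]:
--     """Get content improvement recommendations"""
--     recommendations = []
--
--     if any("too short" in issue for issue in issues):
--         recommendations.append("Add more valuable content to improve user engagement")
--
--     if any("heading structure" in issue for issue in issues):
--         recommendations.append("Improve content structure with proper headings")
--
--     if any("paragraph" in issue for issue in issues):
--         recommendations.append("Break content into more paragraphs for better readability")
--
--     if any("lists" in issue for issue in issues):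
--         recommendations.append("Use lists and bullet points to improve content readability")
--
--     return recommendations
-- ===== SOURCE B (Python) =====
-- def _get_content_recommendations(issues):
--     """Get content improvement recommendations"""
--     table = [
--         ("too short", "Add more valuable content to improve user engagement"),
--         ("heading structure", "Improve content structure with proper headings"),
--         ("paragraph", "Break content into more paragraphs for better readability"),
--         ("lists", "Use lists and bullet points to improve content readability"),
--     ]
--     found = set()
--     for issue in issues:
--         for kw, _ in table:
--             if kw in issue:
--                 found.add(kw)
--     return [rec for kw, rec in table if kw in found]
-- ===== Notes on version B (the rewrite author's own statement) =====
-- stated objective: alternative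
-- what changed: Replaces four separate any()-scans of the issue list by a single pass over issues that records matched keywords in a set, followed by a fixed-order pass over a (keyword, recommendation) table.
import Mathlib
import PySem

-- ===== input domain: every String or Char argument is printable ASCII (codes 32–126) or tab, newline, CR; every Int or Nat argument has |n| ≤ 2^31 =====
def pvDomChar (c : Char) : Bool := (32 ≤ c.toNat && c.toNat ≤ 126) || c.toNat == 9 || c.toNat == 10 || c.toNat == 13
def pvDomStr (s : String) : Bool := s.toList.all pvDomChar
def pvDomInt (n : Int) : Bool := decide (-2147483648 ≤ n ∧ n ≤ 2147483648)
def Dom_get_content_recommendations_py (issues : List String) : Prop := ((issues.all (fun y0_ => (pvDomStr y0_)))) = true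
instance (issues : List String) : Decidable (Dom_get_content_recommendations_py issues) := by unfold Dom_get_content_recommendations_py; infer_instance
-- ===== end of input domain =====

-- B builds a matched-keyword set in one pass over the issues, then emits recommendations from a fixed-order table; alternative decomposition, same cost.

-- ===== PORT A =====
def get_content_recommendations_py (issues : List String) : List String :=
  let recommendations : List String := []
  let recommendations :=
    if issues.any (fun issue => PySem.Str.isIn "too short" issue) then
      recommendations ++ ["Add more valuable content to improve user engagement"]
    else recommendations
  let recommendations :=
    if issues.any (fun issue => PySem.Str.isIn "heading structure" issue) then
      recommendations ++ ["Improve content structure with proper headings"]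
    else recommendations
  let recommendations :=
    if issues.any (fun issue => PySem.Str.isIn "paragraph" issue) then
      recommendations ++ ["Break content into more paragraphs for better readability"]
    else recommendations
  let recommendations :=
    if issues.any (fun issue => PySem.Str.isIn "lists" issue) then
      recommendations ++ ["Use lists and bullet points to improve content readability"]
    else recommendations
  recommendations

-- ===== PORT B =====
def pvTable : List (String × String) :=
  [("too short", "Add more valuable content to improve user engagement"),
   ("heading structure", "Improve content structure with proper headings"),
   ("paragraph", "Break content into more paragraphs for better readability"),
   ("lists", "Use lists and bullet points to improve content readability")]

def pvFound (issues : List String) : PySem.Set String :=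
  issues.foldl (fun s issue =>
    pvTable.foldl (fun s p =>
      if PySem.Str.isIn p.1 issue then PySem.Set.add s p.1 else s) s)
    PySem.Set.empty

def get_content_recommendations_py_alt (issues : List String) : List String :=
  let found := pvFound issues
  (pvTable.filter (fun p => PySem.Set.contains found p.1)).map (fun p => p.2)

-- ===== PRECONDITION & SPEC =====
def Spec_get_content_recommendations_py (issues : List String) (out : List String) : Prop := out = get_content_recommendations_py_alt issues
instance (issues : List String) (out : List String) : Decidable (Spec_get_content_recommendations_py issues out) := by unfold Spec_get_content_recommendations_py; infer_instance

-- ===== CLAIM (what is proved, stated in full; the proofs are below) =====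
def Claim_equal_get_content_recommendations_py : Prop := ∀ (issues : List String), Dom_get_content_recommendations_py issues → Spec_get_content_recommendations_py issues (get_content_recommendations_py issues)

-- ===== LEMMAS AND PROOFS =====

-- membership in the inner (keyword) fold for one issue
theorem pv_mem_inner (kws : List (String × String)) (issue : String) (s : PySem.Set String) (x : String) :
    x ∈ kws.foldl (fun s p => if PySem.Str.isIn p.1 issue then PySem.Set.add s p.1 else s) s ↔
      x ∈ s ∨ ((∃ p ∈ kws, p.1 = x) ∧ PySem.Str.isIn x issue = true) := by
  induction kws generalizing s with
  | nil => simp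
  | cons p kws ih =>
    simp only [List.foldl_cons, ih]
    by_cases h : PySem.Str.isIn p.1 issue = true
    · simp only [h, if_pos]
      rw [PySem.Set.mem_add]
      constructor
      · rintro (⟨hx | rfl⟩ | ⟨⟨q, hq, rfl⟩, hqi⟩)
        · exact Or.inl hx
        · exact Or.inr ⟨⟨p, by simp, rfl⟩, h⟩
        · exact Or.inr ⟨⟨q, by simp [hq], rfl⟩, hqi⟩
      · rintro (hx | ⟨⟨q, hq, rfl⟩, hqi⟩)
        · exact Or.inl (Or.inl hx)
        · rcases List.mem_cons.mp hq with rfl | hq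
          · exact Or.inl (Or.inr rfl)
          · exact Or.inr ⟨⟨q, hq, rfl⟩, hqi⟩
    · simp only [h, if_neg, Bool.not_eq_true]
      constructor
      · rintro (hx | ⟨⟨q, hq, rfl⟩, hqi⟩)
        · exact Or.inl hx
        · exact Or.inr ⟨⟨q, by simp [hq], rfl⟩, hqi⟩
      · rintro (hx | ⟨⟨q, hq, rfl⟩, hqi⟩)
        · exact Or.inl hx
        · rcases List.mem_cons.mp hq with rfl | hq
          · exact absurd hqi (by simpa using h)
          · exact Or.inr ⟨⟨q, hq, rfl⟩, hqi⟩

-- membership in the outer (issues) fold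
theorem pv_mem_found (issues : List String) (s : PySem.Set String) (x : String) :
    x ∈ issues.foldl (fun s issue =>
        pvTable.foldl (fun s p => if PySem.Str.isIn p.1 issue then PySem.Set.add s p.1 else s) s) s ↔
      x ∈ s ∨ ((∃ p ∈ pvTable, p.1 = x) ∧ ∃ issue ∈ issues, PySem.Str.isIn x issue = true) := by
  induction issues generalizing s with
  | nil => simp
  | cons i issues ih =>
    simp only [List.foldl_cons, ih, pv_mem_inner]
    constructor
    · rintro ((hx | ⟨hk, hi⟩) | ⟨hk, q, hq, hqi⟩)
      · exact Or.inl hx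
      · exact Or.inr ⟨hk, i, by simp, hi⟩
      · exact Or.inr ⟨hk, q, by simp [hq], hqi⟩
    · rintro (hx | ⟨hk, q, hq, hqi⟩)
      · exact Or.inl (Or.inl hx)
      · rcases List.mem_cons.mp hq with rfl | hq
        · exact Or.inl (Or.inr ⟨hk, hqi⟩)
        · exact Or.inr ⟨hk, q, hq, hqi⟩

theorem pv_contains_found (issues : List String) (x : String) (hx : ∃ p ∈ pvTable, p.1 = x) :
    PySem.Set.contains (pvFound issues) x = issues.any (fun issue => PySem.Str.isIn x issue) := by
  have hmem : PySem.Set.contains (pvFound issues) x = true ↔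
      ∃ issue ∈ issues, PySem.Str.isIn x issue = true := by
    rw [PySem.Set.contains_iff]
    unfold pvFound
    rw [pv_mem_found]
    simp [PySem.Set.empty, hx]
  rcases h : issues.any (fun issue => PySem.Str.isIn x issue) with _ | _
  · rw [Bool.eq_false_iff, Ne, hmem]
    simp only [List.any_eq_false] at h
    rintro ⟨i, hi, hxi⟩
    exact absurd hxi (by simpa using h i hi)
  · exact hmem.mpr (by simpa [List.any_eq_true] using h)

-- ===== VERDICT (by name: the statement is the Claim_ definition above) =====
theorem get_content_recommendations_py_spec : Claim_equal_get_content_recommendations_py := by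
  intro issues _
  unfold Spec_get_content_recommendations_py get_content_recommendations_py get_content_recommendations_py_alt
  have h1 := pv_contains_found issues "too short" ⟨("too short", "Add more valuable content to improve user engagement"), by simp [pvTable]⟩
  have h2 := pv_contains_found issues "heading structure" ⟨("heading structure", "Improve content structure with proper headings"), by simp [pvTable]⟩
  have h3 := pv_contains_found issues "paragraph" ⟨("paragraph", "Break content into more paragraphs for better readability"), by simp [pvTable]⟩
  have h4 := pv_contains_found issues "lists" ⟨("lists", "Use lists and bullet points to improve content readability"), by simp [pvTable]⟩
  simp only [pvTable, List.filter_cons, List.filter_nil, h1, h2, h3, h4]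
  rcases issues.any (fun issue => PySem.Str.isIn "too short" issue) <;>
  rcases issues.any (fun issue => PySem.Str.isIn "heading structure" issue) <;>
  rcases issues.any (fun issue => PySem.Str.isIn "paragraph" issue) <;>
  rcases issues.any (fun issue => PySem.Str.isIn "lists" issue) <;>
    simp
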